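-- pv_equiv track=rewrite | github.com/texpress30/scripts | apps/backend/app/services/feed_management/master_fields/service.py | _suggest_source_field
-- ===== SOURCE A (Python) =====
-- from typing import Any
--
-- def _normalize(name: str) -> str:
--     """Normalize a field name for fuzzy comparison."""
--     return name.lower().replace("-", "_").replace(" ", "_")
--
-- def _suggest_source_field(
--     target: dict[str, Any],
--     source_field_names: list[str],
-- ) -> str | None:
--     """Find the best matching source field for a target field dict."""
--     if not source_field_names:
--         return None
--
--     t_norm = _normalize(target["field_key"])
--     candidates: dict[str, str] = {_normalize(s): s for s in source_field_names}
--
--     # 1. Exact match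
--     if t_norm in candidates:
--         return candidates[t_norm]
--
--     # 2. Google attribute match (e.g. source has "g:title" or "g_title")
--     google_attr = target.get("google_attribute")
--     if google_attr:
--         g_norm = _normalize(google_attr)
--         g_clean = g_norm.replace("g:", "").replace("g_", "")
--         for c_norm, c_orig in candidates.items():
--             if c_norm == g_norm or c_norm == g_clean:
--                 return c_orig
--
--     # 3. Target name contained in source field (product_title -> title)
--     for c_norm, c_orig in candidates.items():
--         if t_norm in c_norm:
--             return c_orig
--
--     # 4. Source field contained in target (title -> product_title)
--     for c_norm, c_orig in candidates.items():
--         if c_norm in t_norm and len(c_norm) >= 3: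
--             return c_orig
--
--     return None
-- ===== SOURCE B (Python) =====
-- from typing import Any
--
-- def _normalize(name: str) -> str:
--     """Normalize a field name for fuzzy comparison."""
--     return name.lower().replace("-", "_").replace(" ", "_")
--
-- def _suggest_source_field(
--     target: dict[str, Any],
--     source_field_names: list[str],
-- ) -> str | None:
--     """Find the best matching source field: one pass ranking each candidate."""
--     if not source_field_names:
--         return None
--
--     t_norm = _normalize(target["field_key"])
--     candidates: dict[str, str] = {_normalize(s): s for s in source_field_names}
--
--     google_attr = target.get("google_attribute")
--     if google_attr:
--         g_norm = _normalize(google_attr)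
--         g_forms = (g_norm, g_norm.replace("g:", "").replace("g_", ""))
--     else:
--         g_forms = None
--
--     def rank(c_norm: str):
--         if c_norm == t_norm:
--             return 0
--         if g_forms is not None and c_norm in g_forms:
--             return 1
--         if t_norm in c_norm:
--             return 2
--         if c_norm in t_norm and len(c_norm) >= 3:
--             return 3
--         return None
--
--     best = None  # (rank, original name); first seen wins ties
--     for c_norm, c_orig in candidates.items():
--         r = rank(c_norm)
--         if r is not None and (best is None or r < best[0]):
--             best = (r, c_orig)
--     return best[1] if best is not None else None
-- ===== Notes on version B (the rewrite author's own statement) =====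
-- stated objective: alternative
-- what changed: A's four sequential scans of the candidate dict (exact lookup, google-form loop, substring loop, reverse-substring loop) are replaced by a single pass that assigns each candidate a priority rank 0-3 and keeps the first-seen candidate of lowest rank.
import Mathlib
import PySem

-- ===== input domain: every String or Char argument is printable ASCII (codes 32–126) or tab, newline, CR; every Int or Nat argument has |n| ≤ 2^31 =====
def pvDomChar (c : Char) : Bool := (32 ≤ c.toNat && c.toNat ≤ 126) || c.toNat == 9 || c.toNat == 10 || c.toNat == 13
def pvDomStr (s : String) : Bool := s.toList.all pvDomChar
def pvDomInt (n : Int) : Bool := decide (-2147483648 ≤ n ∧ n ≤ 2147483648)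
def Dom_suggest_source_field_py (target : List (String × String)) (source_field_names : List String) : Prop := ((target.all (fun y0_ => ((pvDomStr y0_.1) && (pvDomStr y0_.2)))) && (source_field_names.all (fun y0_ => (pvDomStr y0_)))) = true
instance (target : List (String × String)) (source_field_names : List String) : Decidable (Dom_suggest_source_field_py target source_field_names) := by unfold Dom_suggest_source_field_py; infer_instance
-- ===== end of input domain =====

-- B replaces A's four sequential scans of the candidate dict by a single pass that ranks
-- each candidate (0 exact, 1 google form, 2 target-in-candidate, 3 candidate-in-target)
-- and keeps the first-seen candidate of lowest rank (objective: alternative decomposition).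

-- ===== PORT A =====

def pvNormalize (s : String) : String :=
  PySem.Str.replace (PySem.Str.replace (PySem.Str.lower s) "-" "_") " " "_"

-- 'for c_norm, c_orig in candidates.items(): if cond(c_norm): return c_orig'
def pvFirstMatch (cond : String → Bool) : List (String × String) → Option String
  | [] => none
  | (cn, co) :: rest => if cond cn then some co else pvFirstMatch cond rest

def suggest_source_field_py (target : List (String × String)) (source_field_names : List String) : Option String :=
  if source_field_names = [] then none
  else
    match (PySem.Dict.ofList target).get? "field_key" with
    | none => none      -- Python raises KeyError here; excluded by Pre_
    | some fk =>
      let t_norm := pvNormalize fk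
      let candidates := source_field_names.foldl
        (fun d s => d.insert (pvNormalize s) s) (PySem.Dict.empty : PySem.Dict String String)
      if candidates.contains t_norm then candidates.get? t_norm
      else
        let ga := (PySem.Dict.ofList target).getD "google_attribute" ""
        let phase2 :=
          if ga = "" then none
          else
            let g_norm := pvNormalize ga
            let g_clean := PySem.Str.replace (PySem.Str.replace g_norm "g:" "") "g_" ""
            pvFirstMatch (fun cn => cn == g_norm || cn == g_clean) candidates.items
        match phase2 with
        | some r => some r
        | none =>
          match pvFirstMatch (fun cn => PySem.Str.isIn t_norm cn) candidates.items with
          | some r => some r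
          | none =>
            pvFirstMatch (fun cn => PySem.Str.isIn cn t_norm && decide (3 ≤ PySem.Str.len cn))
              candidates.items

-- ===== PORT B =====

def pvRank (t_norm : String) (gforms : Option (String × String)) (cn : String) : Option Nat :=
  if cn == t_norm then some 0
  else if (match gforms with | some (gn, gc) => cn == gn || cn == gc | none => false) then some 1
  else if PySem.Str.isIn t_norm cn then some 2
  else if PySem.Str.isIn cn t_norm && decide (3 ≤ PySem.Str.len cn) then some 3
  else none

-- loop body: keep the first-seen candidate of strictly lowest rank
def pvStep (t_norm : String) (gforms : Option (String × String))
    (best : Option (Nat × String)) (p : String × String) : Option (Nat × String) :=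
  match pvRank t_norm gforms p.1 with
  | none => best
  | some r =>
    match best with
    | none => some (r, p.2)
    | some (br, bv) => if r < br then some (r, p.2) else some (br, bv)

def suggest_source_field_py_alt (target : List (String × String)) (source_field_names : List String) : Option String :=
  if source_field_names = [] then none
  else
    match (PySem.Dict.ofList target).get? "field_key" with
    | none => none      -- Python raises KeyError here; excluded by Pre_
    | some fk =>
      let t_norm := pvNormalize fk
      let candidates := source_field_names.foldl
        (fun d s => d.insert (pvNormalize s) s) (PySem.Dict.empty : PySem.Dict String String)
      let ga := (PySem.Dict.ofList target).getD "google_attribute" ""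
      let gforms :=
        if ga = "" then none
        else
          let g_norm := pvNormalize ga
          some (g_norm, PySem.Str.replace (PySem.Str.replace g_norm "g:" "") "g_" "")
      (candidates.items.foldl (pvStep t_norm gforms) none).map Prod.snd

-- ===== PRECONDITION & SPEC =====
-- Pre_ excludes only the inputs on which Python A raises KeyError: a nonempty source list
-- together with a target dict lacking the key "field_key".
def Pre_suggest_source_field_py (target : List (String × String)) (source_field_names : List String) : Prop :=
  source_field_names = [] ∨ "field_key" ∈ target.map Prod.fst
instance (target : List (String × String)) (source_field_names : List String) : Decidable (Pre_suggest_source_field_py target source_field_names) := by unfold Pre_suggest_source_field_py; infer_instance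

def pvWitness_suggest_source_field_py : (List (String × String)) × List String :=
  ([("field_key", "Product Title"), ("google_attribute", "g:title")], ["g_title", "Product-Title", "ti"])

def Spec_suggest_source_field_py (target : List (String × String)) (source_field_names : List String) (out : Option String) : Prop := out = suggest_source_field_py_alt target source_field_names
instance (target : List (String × String)) (source_field_names : List String) (out : Option String) : Decidable (Spec_suggest_source_field_py target source_field_names out) := by unfold Spec_suggest_source_field_py; infer_instance

-- ===== CLAIM (what is proved, stated in full; the proofs are below) =====
def Claim_equal_suggest_source_field_py : Prop := ∀ (target : List (String × String)) (source_field_names : List String), Dom_suggest_source_field_py target source_field_names → Pre_suggest_source_field_py target source_field_names → Spec_suggest_source_field_py target source_field_names (suggest_source_field_py target source_field_names)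

-- ===== LEMMAS AND PROOFS =====

-- left-biased minimum on (rank, name): the right argument wins only when strictly smaller
def pvMergeL (a b : Option (Nat × String)) : Option (Nat × String) :=
  match a, b with
  | none, b => b
  | a, none => a
  | some (ar, av), some (br, bv) => if br < ar then some (br, bv) else some (ar, av)

def pvToOpt (t_norm : String) (gforms : Option (String × String)) (p : String × String) :
    Option (Nat × String) :=
  (pvRank t_norm gforms p.1).map (fun r => (r, p.2))

-- leftmost minimum-rank candidate of the list
def pvM (t_norm : String) (gforms : Option (String × String)) :
    List (String × String) → Option (Nat × String)
  | [] => none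
  | x :: t => pvMergeL (pvToOpt t_norm gforms x) (pvM t_norm gforms t)

lemma pvMergeL_assoc (a b c : Option (Nat × String)) :
    pvMergeL (pvMergeL a b) c = pvMergeL a (pvMergeL b c) := by
  rcases a with _ | ⟨ar, av⟩ <;> rcases b with _ | ⟨br, bv⟩ <;> rcases c with _ | ⟨cr, cv⟩ <;>
    simp only [pvMergeL] <;> split_ifs <;> (try simp only [pvMergeL]) <;>
    split_ifs <;> first | rfl | omega

lemma pvStep_eq (t_norm : String) (gforms : Option (String × String))
    (acc : Option (Nat × String)) (p : String × String) :
    pvStep t_norm gforms acc p = pvMergeL acc (pvToOpt t_norm gforms p) := by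
  rcases h : pvRank t_norm gforms p.1 with _ | r <;>
    rcases acc with _ | ⟨br, bv⟩ <;> simp [pvStep, pvToOpt, pvMergeL, h]

lemma pvFold_eq (t_norm : String) (gforms : Option (String × String)) :
    ∀ (l : List (String × String)) (acc : Option (Nat × String)),
      l.foldl (pvStep t_norm gforms) acc = pvMergeL acc (pvM t_norm gforms l)
  | [], acc => by simp [pvM]; cases acc <;> simp [pvMergeL]
  | x :: t, acc => by
    simp only [List.foldl_cons, pvStep_eq, pvFold_eq t_norm gforms t, pvM, pvMergeL_assoc]

def pvBind? (k : Nat) (o : Option (Nat × String)) : Option String :=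
  o.bind (fun p => if p.1 ≤ k then some p.2 else none)

-- the four phase conditions, as pvRank checks them
def pvC0 (t_norm : String) (cn : String) : Bool := cn == t_norm
def pvC1 (gforms : Option (String × String)) (cn : String) : Bool :=
  match gforms with | some (gn, gc) => cn == gn || cn == gc | none => false
def pvC2 (t_norm : String) (cn : String) : Bool := PySem.Str.isIn t_norm cn
def pvC3 (t_norm : String) (cn : String) : Bool :=
  PySem.Str.isIn cn t_norm && decide (3 ≤ PySem.Str.len cn)

-- 'return the first phase that produced a hit'
def pvOr (a b : Option String) : Option String :=
  match a with | some r => some r | none => b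

lemma pvOr_assoc (a b c : Option String) : pvOr (pvOr a b) c = pvOr a (pvOr b c) := by
  cases a <;> rfl

lemma pvRank_unfold (t_norm : String) (gforms : Option (String × String)) (cn : String) :
    pvRank t_norm gforms cn =
      if pvC0 t_norm cn then some 0
      else if pvC1 gforms cn then some 1
      else if pvC2 t_norm cn then some 2
      else if pvC3 t_norm cn then some 3
      else none := rfl

-- one induction giving all four "phases so far = best candidate of rank ≤ k" facts at once
lemma pvChain (t_norm : String) (gforms : Option (String × String)) :
    ∀ l : List (String × String),
      pvFirstMatch (pvC0 t_norm) l = pvBind? 0 (pvM t_norm gforms l) ∧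
      pvOr (pvFirstMatch (pvC0 t_norm) l) (pvFirstMatch (pvC1 gforms) l)
        = pvBind? 1 (pvM t_norm gforms l) ∧
      pvOr (pvOr (pvFirstMatch (pvC0 t_norm) l) (pvFirstMatch (pvC1 gforms) l))
        (pvFirstMatch (pvC2 t_norm) l) = pvBind? 2 (pvM t_norm gforms l) ∧
      pvOr (pvOr (pvOr (pvFirstMatch (pvC0 t_norm) l) (pvFirstMatch (pvC1 gforms) l))
        (pvFirstMatch (pvC2 t_norm) l)) (pvFirstMatch (pvC3 t_norm) l)
        = pvBind? 3 (pvM t_norm gforms l) ∧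
      (∀ p, pvM t_norm gforms l = some p → p.1 ≤ 3) := by
  intro l
  induction l with
  | nil => simp [pvFirstMatch, pvM, pvBind?, pvOr]
  | cons x t ih =>
    obtain ⟨ih0, ih1, ih2, ih3, ihle⟩ := ih
    obtain ⟨cn, co⟩ := x
    have hM : pvM t_norm gforms ((cn, co) :: t)
        = pvMergeL (pvToOpt t_norm gforms (cn, co)) (pvM t_norm gforms t) := rfl
    -- the head's rank is one of 0, 1, 2, 3, none, each fixed by the phase conditions
    by_cases h0 : pvC0 t_norm cn
    · have hT : pvToOpt t_norm gforms (cn, co) = some (0, co) := by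
        simp [pvToOpt, pvRank_unfold, h0]
      rw [hM, hT]
      rcases hMt : pvM t_norm gforms t with _ | ⟨r, v⟩ <;>
        rw [hMt] at ih0 ih1 ih2 ih3 ihle <;>
        [skip; (have hr3 : r ≤ 3 := ihle (r, v) rfl; interval_cases r)] <;>
        simp_all [pvFirstMatch, pvMergeL, pvBind?, pvOr]
    · by_cases h1 : pvC1 gforms cn
      · have hT : pvToOpt t_norm gforms (cn, co) = some (1, co) := by
          simp [pvToOpt, pvRank_unfold, h0, h1]
        rw [hM, hT]
        rcases hMt : pvM t_norm gforms t with _ | ⟨r, v⟩ <;>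
          rw [hMt] at ih0 ih1 ih2 ih3 ihle <;>
          [skip; (have hr3 : r ≤ 3 := ihle (r, v) rfl; interval_cases r)] <;>
          simp_all [pvFirstMatch, pvMergeL, pvBind?, pvOr]
      · by_cases h2 : pvC2 t_norm cn
        · have hT : pvToOpt t_norm gforms (cn, co) = some (2, co) := by
            simp [pvToOpt, pvRank_unfold, h0, h1, h2]
          rw [hM, hT]
          rcases hMt : pvM t_norm gforms t with _ | ⟨r, v⟩ <;>
            rw [hMt] at ih0 ih1 ih2 ih3 ihle <;>
            [skip; (have hr3 : r ≤ 3 := ihle (r, v) rfl; interval_cases r)] <;>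
            simp_all [pvFirstMatch, pvMergeL, pvBind?, pvOr]
        · by_cases h3 : pvC3 t_norm cn
          · have hT : pvToOpt t_norm gforms (cn, co) = some (3, co) := by
              simp [pvToOpt, pvRank_unfold, h0, h1, h2, h3]
            rw [hM, hT]
            rcases hMt : pvM t_norm gforms t with _ | ⟨r, v⟩ <;>
              rw [hMt] at ih0 ih1 ih2 ih3 ihle <;>
              [skip; (have hr3 : r ≤ 3 := ihle (r, v) rfl; interval_cases r)] <;>
              simp_all [pvFirstMatch, pvMergeL, pvBind?, pvOr]
          · have hT : pvToOpt t_norm gforms (cn, co) = none := by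
              simp [pvToOpt, pvRank_unfold, h0, h1, h2, h3]
            rw [hM, hT]
            rcases hMt : pvM t_norm gforms t with _ | ⟨r, v⟩ <;>
              rw [hMt] at ih0 ih1 ih2 ih3 ihle <;>
              [skip; (have hr3 : r ≤ 3 := ihle (r, v) rfl; interval_cases r)] <;>
              simp_all [pvFirstMatch, pvMergeL, pvBind?, pvOr]

-- first match on key-equality in a list with nodup keys = the unique association
lemma pvFirstMatch_key_of_mem (t : String) (v : String) :
    ∀ l : List (String × String), (l.map Prod.fst).Nodup → (t, v) ∈ l →
      pvFirstMatch (pvC0 t) l = some v := by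
  intro l
  induction l with
  | nil => simp
  | cons x rest ih =>
    intro hnd hmem
    obtain ⟨cn, co⟩ := x
    simp only [List.map_cons, List.nodup_cons] at hnd
    rcases List.mem_cons.mp hmem with h | h
    · have h1 : cn = t := (Prod.ext_iff.mp h.symm).1
      have h2 : co = v := (Prod.ext_iff.mp h.symm).2
      subst h1; subst h2
      simp [pvFirstMatch, pvC0]
    · have hne : ¬ (cn == t) = true := by
        intro hbe
        exact hnd.1 ((eq_of_beq hbe) ▸ (List.mem_map.mpr ⟨(t, v), h, rfl⟩))
      simp [pvFirstMatch, pvC0, hne, ih hnd.2 h]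

lemma pvFirstMatch_mem (cond : String → Bool) :
    ∀ l : List (String × String), ∀ v, pvFirstMatch cond l = some v →
      ∃ k, (k, v) ∈ l ∧ cond k := by
  intro l
  induction l with
  | nil => simp [pvFirstMatch]
  | cons x rest ih =>
    intro v h
    obtain ⟨cn, co⟩ := x
    by_cases hc : cond cn
    · simp [pvFirstMatch, hc] at h
      exact ⟨cn, by simp [h], hc⟩
    · simp [pvFirstMatch, hc] at h
      obtain ⟨k, hk, hck⟩ := ih v h
      exact ⟨k, by simp [hk], hck⟩

lemma pvNodupCandKeys (src : List String) :
    ∀ d : PySem.Dict String String, d.keys.Nodup →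
      ((src.foldl (fun d s => d.insert (pvNormalize s) s) d).keys).Nodup := by
  induction src with
  | nil => intro d h; simpa using h
  | cons s rest ih =>
    intro d h
    exact ih _ (PySem.Dict.nodup_keys_insert d _ _ h)

-- ===== VERDICT (by name: the statement is the Claim_ definition above) =====
theorem suggest_source_field_py_spec : Claim_equal_suggest_source_field_py := by
  intro target source _dom _pre
  unfold Spec_suggest_source_field_py suggest_source_field_py suggest_source_field_py_alt
  by_cases hsrc : source = []
  · simp [hsrc]
  · simp only [hsrc, if_false]
    rcases hfk : (PySem.Dict.ofList target).get? "field_key" with _ | fk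
    · rfl
    · simp only []
      set t_norm := pvNormalize fk with ht
      set candidates := source.foldl (fun d s => d.insert (pvNormalize s) s)
        (PySem.Dict.empty : PySem.Dict String String) with hcand
      set ga := (PySem.Dict.ofList target).getD "google_attribute" "" with hga
      set gforms := (if ga = "" then none
        else
          let g_norm := pvNormalize ga
          some (g_norm, PySem.Str.replace (PySem.Str.replace g_norm "g:" "") "g_" ""))
        with hgf
      have hnd : candidates.keys.Nodup := by
        apply pvNodupCandKeys
        simp [PySem.Dict.keys_empty]
      have hndl : ((candidates.items.map Prod.fst)).Nodup := hnd
      obtain ⟨hch0, hch1, hch2, hch3, hle⟩ := pvChain t_norm gforms candidates.items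
      -- B's fold = leftmost minimum-rank candidate = the full phase chain
      have hB : (candidates.items.foldl (pvStep t_norm gforms) none).map Prod.snd =
          pvBind? 3 (pvM t_norm gforms candidates.items) := by
        rw [pvFold_eq]
        rcases hMv : pvM t_norm gforms candidates.items with _ | ⟨r, v⟩
        · simp [pvMergeL, pvBind?]
        · have := hle _ hMv
          simp only [pvMergeL, pvBind?, Option.map_some, Option.bind_some]
          rw [if_pos this]
      rw [hB, ← hch3]
      -- the A-side phase-2 expression is pvFirstMatch (pvC1 gforms)
      have h1 : (if ga = "" then (none : Option String)
          else
            let g_norm := pvNormalize ga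
            let g_clean := PySem.Str.replace (PySem.Str.replace g_norm "g:" "") "g_" ""
            pvFirstMatch (fun cn => cn == g_norm || cn == g_clean) candidates.items) =
          pvFirstMatch (pvC1 gforms) candidates.items := by
        by_cases hg : ga = ""
        · simp only [hg, if_true] at hgf ⊢
          rw [hgf]
          induction candidates.items with
          | nil => rfl
          | cons x t ihx => simp [pvFirstMatch, pvC1, ihx]
        · simp only [hg, if_false] at hgf ⊢
          rw [hgf]
          rfl
      -- now compare A's code with the phase chain
      by_cases hc : candidates.contains t_norm
      · -- exact match: dict lookup = first key-equality match
        rcases hget : candidates.get? t_norm with _ | v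
        · rw [PySem.Dict.contains_eq_isSome_get?, hget] at hc; simp at hc
        · have hmem : (t_norm, v) ∈ candidates.items :=
            (PySem.Dict.get?_eq_some_iff_mem_items candidates t_norm v hnd).mp hget
          have h0 : pvFirstMatch (pvC0 t_norm) candidates.items = some v :=
            pvFirstMatch_key_of_mem t_norm v candidates.items hndl hmem
          simp [hc]
          rw [h0]
          rfl
      · -- no exact match: the chain starts with none and A's three loops follow it
        have hc' : candidates.contains t_norm = false := by simpa using hc
        have h0 : pvFirstMatch (pvC0 t_norm) candidates.items = none := by
          rcases hfm : pvFirstMatch (pvC0 t_norm) candidates.items with _ | v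
          · rfl
          · obtain ⟨k, hk, hck⟩ := pvFirstMatch_mem (pvC0 t_norm) candidates.items v hfm
            have hkt : k = t_norm := eq_of_beq hck
            rw [PySem.Dict.contains_iff_mem_keys] at hc
            exact absurd (hkt ▸ (List.mem_map.mpr ⟨(k, v), hk, rfl⟩)) hc
        simp only [hc', Bool.false_eq_true, if_false, h1]
        rw [h0]
        have hnone : ∀ b : Option String, pvOr none b = b := fun b => rfl
        rw [hnone, pvOr_assoc]
        rfl
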